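-- pv_equiv track=rewrite | github.com/MrBrantCode/unitest_baseline | mut_generate/mist_train_cf/cf_3437/solution.py | square_odd_numbers
-- ===== SOURCE A (Python) =====
-- def square_odd_numbers(input_list):
--     squared_list = []
--     seen = set()  # To keep track of unique odd numbers
--
--     for num in input_list:
--         if num % 2 != 0:  # Only consider odd numbers
--             if num not in seen:  # Exclude duplicates
--                 squared_list.append(num ** 2)
--                 seen.add(num)
--
--     return squared_list
-- ===== SOURCE B (Python) =====
-- def square_odd_numbers(input_list):
--     result = []
--     rest = list(input_list)
--     while rest:
--         head = rest[0]
--         rest = [x for x in rest[1:] if x != head]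
--         if head % 2 != 0:
--             result.append(head * head)
--     return result
-- ===== Notes on version B (the rewrite author's own statement) =====
-- stated objective: alternative
-- what changed: Replaced the single pass with a seen-set by a repeated-extraction loop that keeps no auxiliary structure: it takes the current head, deletes all its later duplicates from the remaining worklist, and squares the head if odd.
import Mathlib
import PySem

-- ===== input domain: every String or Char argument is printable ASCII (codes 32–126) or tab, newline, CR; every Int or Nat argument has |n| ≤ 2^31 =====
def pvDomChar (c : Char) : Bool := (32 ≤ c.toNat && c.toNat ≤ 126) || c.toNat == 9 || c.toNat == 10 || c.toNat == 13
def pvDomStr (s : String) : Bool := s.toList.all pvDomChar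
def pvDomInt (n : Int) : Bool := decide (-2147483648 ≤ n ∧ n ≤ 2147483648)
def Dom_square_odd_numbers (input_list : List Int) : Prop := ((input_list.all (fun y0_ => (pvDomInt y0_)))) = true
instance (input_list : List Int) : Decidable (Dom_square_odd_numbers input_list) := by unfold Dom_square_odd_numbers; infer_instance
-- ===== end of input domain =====

-- B replaces A's single pass with a seen-set by a repeated-extraction worklist loop
-- (take the head, delete its later duplicates, square it if odd) — objective: alternative.


-- ===== PORT A =====
def square_odd_numbers (input_list : List Int) : List Int :=
  (input_list.foldl (fun (st : List Int × PySem.Set Int) num =>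
    if PySem.Int.mod num 2 ≠ 0 then          -- only consider odd numbers
      if ¬ (PySem.Set.contains st.2 num = true) then   -- exclude duplicates
        (st.1 ++ [num ^ 2], PySem.Set.add st.2 num)
      else st
    else st) ([], PySem.Set.empty)).1

-- ===== PORT B =====
-- Source B's while-loop: state (result, rest); each step removes the head and all
-- its later duplicates from rest, appending head*head to result if head is odd.
def sonAltLoop (result : List Int) (rest : List Int) : List Int :=
  match rest with
  | [] => result
  | head :: t =>
      sonAltLoop
        (if PySem.Int.mod head 2 ≠ 0 then result ++ [head * head] else result)
        (t.filter (fun x => x ≠ head))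
  termination_by rest.length
  decreasing_by
    simpa using List.length_filter_le _ t.attach

def square_odd_numbers_alt (input_list : List Int) : List Int :=
  sonAltLoop [] input_list

-- ===== PRECONDITION & SPEC =====
def Spec_square_odd_numbers (input_list : List Int) (out : List Int) : Prop := out = square_odd_numbers_alt input_list
instance (input_list : List Int) (out : List Int) : Decidable (Spec_square_odd_numbers input_list out) := by unfold Spec_square_odd_numbers; infer_instance

-- ===== CLAIM (what is proved, stated in full; the proofs are below) =====
def Claim_equal_square_odd_numbers : Prop := ∀ (input_list : List Int), Dom_square_odd_numbers input_list → Spec_square_odd_numbers input_list (square_odd_numbers input_list)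

-- ===== LEMMAS AND PROOFS =====

-- First occurrences, by repeated extraction: the common specification both ports meet.
def firstOccs (l : List Int) : List Int :=
  match l with
  | [] => []
  | x :: t => x :: firstOccs (t.filter (fun y => y ≠ x))
  termination_by l.length
  decreasing_by
    simpa using List.length_filter_le _ t.attach

-- Set.update only ever appends: the old set is a prefix of the updated one.
lemma update_eq_append (xs : List Int) (s : PySem.Set Int) :
    ∃ u, PySem.Set.update s xs = s ++ u := by
  induction xs generalizing s with
  | nil => exact ⟨[], by simp [PySem.Set.update]⟩
  | cons x xs ih =>
    rcases ih (PySem.Set.add s x) with ⟨u, hu⟩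
    by_cases hx : x ∈ s
    · exact ⟨u, by rw [PySem.Set.update_cons, hu, PySem.Set.add_of_mem hx]⟩
    · exact ⟨x :: u, by
        rw [PySem.Set.update_cons, hu, PySem.Set.add_of_not_mem hx, List.append_assoc]
        rfl⟩

-- A's loop invariant: the fold started at (acc, s) appends the squares of the
-- fresh elements Set.update s (odds of l) adds after s.
lemma a_loop_invariant (l : List Int) (acc : List Int) (s : PySem.Set Int) :
    (l.foldl (fun (st : List Int × PySem.Set Int) num =>
      if PySem.Int.mod num 2 ≠ 0 then
        if ¬ (PySem.Set.contains st.2 num = true) then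
          (st.1 ++ [num ^ 2], PySem.Set.add st.2 num)
        else st
      else st) (acc, s)).1
    = acc ++ ((PySem.Set.update s (l.filter (fun n => PySem.Int.mod n 2 ≠ 0))).drop s.length).map
        (fun n => n * n) := by
  induction l generalizing acc s with
  | nil => simp [PySem.Set.update]
  | cons x l ih =>
    by_cases hodd : PySem.Int.mod x 2 ≠ 0
    · have hd : decide (PySem.Int.mod x 2 ≠ 0) = true := decide_eq_true hodd
      by_cases hmem : x ∈ s
      · have hc : PySem.Set.contains s x = true := (PySem.Set.contains_iff s x).2 hmem
        rw [List.foldl_cons, if_pos hodd, if_neg (not_not_intro hc), List.filter_cons, hd,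
          if_pos rfl, PySem.Set.update_cons, PySem.Set.add_of_mem hmem]
        exact ih acc s
      · have hnc : ¬ PySem.Set.contains s x = true := by
          simpa [PySem.Set.contains_iff] using hmem
        rw [List.foldl_cons, if_pos hodd, if_pos hnc, List.filter_cons, hd, if_pos rfl,
          PySem.Set.update_cons, ih]
        rcases update_eq_append (l.filter (fun n => PySem.Int.mod n 2 ≠ 0))
          (PySem.Set.add s x) with ⟨u, hu⟩
        have hadd : PySem.Set.add s x = s ++ [x] := PySem.Set.add_of_not_mem hmem
        rw [hu, hadd]
        have h1 : ((s ++ [x]) ++ u).drop (s ++ [x]).length = u := List.drop_left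
        have h2 : ((s ++ [x]) ++ u).drop s.length = x :: u := by
          rw [List.append_assoc]; exact List.drop_left
        rw [h1, h2]
        simp [pow_two]
    · have hd : decide (PySem.Int.mod x 2 ≠ 0) = false := decide_eq_false hodd
      rw [List.foldl_cons, if_neg hodd, List.filter_cons, hd]
      simp only [Bool.false_eq_true, if_false]
      exact ih acc s

-- Set.update seeded with s builds exactly the first occurrences of the unseen elements.
lemma update_eq_firstOccs (l : List Int) (s : PySem.Set Int) :
    PySem.Set.update s l = s ++ firstOccs (l.filter (fun x => ¬ x ∈ s)) := by
  induction l generalizing s with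
  | nil => simp [PySem.Set.update, firstOccs]
  | cons x l ih =>
    rw [PySem.Set.update_cons]
    by_cases hx : x ∈ s
    · rw [PySem.Set.add_of_mem hx, ih]
      congr 2
      simp [hx]
    · rw [PySem.Set.add_of_not_mem hx, ih]
      have hfil : l.filter (fun y => ¬ y ∈ s ++ [x])
          = (l.filter (fun y => ¬ y ∈ s)).filter (fun y => y ≠ x) := by
        rw [List.filter_filter]
        apply List.filter_congr
        intro y _
        by_cases h1 : y ∈ s <;> by_cases h2 : y = x <;> simp [h1, h2]
      rw [hfil, List.append_assoc]
      congr 1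
      have : (x :: l).filter (fun y => ¬ y ∈ s) = x :: l.filter (fun y => ¬ y ∈ s) := by
        simp [hx]
      rw [this, firstOccs]
      rfl

-- Filtering commutes with first-occurrence extraction (fuel induction on length).
lemma filter_firstOccs_aux (p : Int → Bool) :
    ∀ (n : Nat) (l : List Int), l.length ≤ n →
      (firstOccs l).filter p = firstOccs (l.filter p) := by
  intro n
  induction n with
  | zero =>
    intro l h
    have : l = [] := List.length_eq_zero_iff.mp (Nat.le_zero.mp h)
    subst this
    simp [firstOccs]
  | succ n ih =>
    intro l h
    cases l with
    | nil => simp [firstOccs]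
    | cons x t =>
      have ht : (t.filter (fun y => y ≠ x)).length ≤ n :=
        le_trans (List.length_filter_le _ _) (Nat.lt_succ_iff.mp (by simpa using h))
      rw [firstOccs, List.filter_cons]
      by_cases hp : p x = true
      · have hcomm : (t.filter (fun y => y ≠ x)).filter p
            = (t.filter p).filter (fun y => y ≠ x) := by
          rw [List.filter_filter, List.filter_filter]
          apply List.filter_congr
          intro y _
          by_cases h2 : y = x <;> simp [h2, Bool.and_comm]
        rw [hp, if_pos rfl, ih _ ht, hcomm, List.filter_cons, hp, if_pos rfl, firstOccs]
      · have hp' : p x = false := by simpa using hp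
        have hid : (t.filter p).filter (fun y => y ≠ x) = t.filter p := by
          apply List.filter_eq_self.mpr
          intro y hy
          have hpy : p y = true := List.of_mem_filter hy
          have : y ≠ x := fun hyx => by rw [hyx, hp'] at hpy; exact Bool.false_ne_true hpy
          simpa using this
        have hcomm : (t.filter (fun y => y ≠ x)).filter p
            = (t.filter p).filter (fun y => y ≠ x) := by
          rw [List.filter_filter, List.filter_filter]
          apply List.filter_congr
          intro y _
          by_cases h2 : y = x <;> simp [h2, Bool.and_comm]
        rw [hp', if_neg (by simp), ih _ ht, hcomm, hid, List.filter_cons, hp',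
          if_neg (by simp)]

lemma filter_firstOccs (p : Int → Bool) (l : List Int) :
    (firstOccs l).filter p = firstOccs (l.filter p) :=
  filter_firstOccs_aux p l.length l le_rfl

-- B's loop invariant: the worklist loop appends the squares of the odd first occurrences.
lemma b_loop_invariant_aux :
    ∀ (n : Nat) (l : List Int), l.length ≤ n → ∀ (acc : List Int),
      sonAltLoop acc l
        = acc ++ ((firstOccs l).filter (fun m => PySem.Int.mod m 2 ≠ 0)).map (fun m => m * m) := by
  intro n
  induction n with
  | zero =>
    intro l h acc
    have : l = [] := List.length_eq_zero_iff.mp (Nat.le_zero.mp h)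
    subst this
    simp [sonAltLoop, firstOccs]
  | succ n ih =>
    intro l h acc
    cases l with
    | nil => simp [sonAltLoop, firstOccs]
    | cons x t =>
      have ht : (t.filter (fun y => y ≠ x)).length ≤ n :=
        le_trans (List.length_filter_le _ _) (Nat.lt_succ_iff.mp (by simpa using h))
      rw [sonAltLoop, ih _ ht, firstOccs, List.filter_cons]
      by_cases hodd : PySem.Int.mod x 2 ≠ 0
      · rw [if_pos hodd, if_pos (by simpa using hodd)]
        simp
      · rw [if_neg hodd, if_neg (by simpa using hodd)]

lemma b_loop_invariant (l : List Int) (acc : List Int) :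
    sonAltLoop acc l
      = acc ++ ((firstOccs l).filter (fun m => PySem.Int.mod m 2 ≠ 0)).map (fun m => m * m) :=
  b_loop_invariant_aux l.length l le_rfl acc

theorem square_odd_numbers_eq (input_list : List Int) :
    square_odd_numbers input_list = square_odd_numbers_alt input_list := by
  unfold square_odd_numbers square_odd_numbers_alt
  rw [a_loop_invariant, b_loop_invariant,
    filter_firstOccs (fun n => PySem.Int.mod n 2 ≠ 0) input_list]
  have hupd := update_eq_firstOccs (input_list.filter (fun n => PySem.Int.mod n 2 ≠ 0))
    PySem.Set.empty
  simp only [PySem.Set.empty, List.nil_append, List.length_nil, List.drop_zero] at *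
  rw [hupd]
  simp

-- ===== VERDICT (by name: the statement is the Claim_ definition above) =====
theorem square_odd_numbers_spec : Claim_equal_square_odd_numbers := by
  intro l _
  exact square_odd_numbers_eq l
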